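-- pv_equiv track=rewrite | github.com/Sriram-1704/DSA | Number Programs/Replace_0s_1s.py | replaceZero
-- ===== SOURCE A (Python) =====
-- def replaceZero(n):
--
--     if n == 0:
--         return 1
--
--     result = 0
--     place = 1
--
--     while n > 0:
--         digit = n % 10
--
--         if digit == 0:
--             digit = 1
--
--         result += digit * place
--
--         place *= 10
--         n //= 10
--
--     return result
-- ===== SOURCE B (Python) =====
-- def replaceZero(n):
--     result = 0
--     for ch in str(n):
--         result = 10 * result + (1 if ch == '0' else int(ch))
--     return result
-- ===== Notes on version B (the rewrite author's own statement) =====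
-- stated objective: idiomatic
-- what changed: A extracts digits arithmetically (n % 10, n //= 10) and rebuilds the number with a running place-value multiplier; B does one left-to-right Horner scan over the decimal string str(n), turning each zero digit into a one.
-- outside the precondition, e.g. on replaceZero(-105): A returns 0, B raises ValueError
import Mathlib
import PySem

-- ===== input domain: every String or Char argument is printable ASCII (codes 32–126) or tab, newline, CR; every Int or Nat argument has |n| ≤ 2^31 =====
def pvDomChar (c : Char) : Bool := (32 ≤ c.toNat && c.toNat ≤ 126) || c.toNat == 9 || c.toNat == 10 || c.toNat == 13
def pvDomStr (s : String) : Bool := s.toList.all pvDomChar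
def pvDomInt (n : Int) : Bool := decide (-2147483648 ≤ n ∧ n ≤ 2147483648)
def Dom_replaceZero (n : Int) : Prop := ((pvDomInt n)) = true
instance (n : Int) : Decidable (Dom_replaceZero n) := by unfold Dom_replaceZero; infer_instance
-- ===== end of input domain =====

-- B replaces A's arithmetic digit loop (n % 10 / place-value reconstruction) by a single
-- left-to-right Horner scan over the decimal string str(n); objective: more idiomatic.


-- ===== PORT A =====
-- the 'while n > 0' loop, state (n, result, place)
def replaceZeroLoop (n result place : Int) : Int :=
  if h : n > 0 then
    let digit := PySem.Int.mod n 10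
    let digit := if digit = 0 then 1 else digit
    replaceZeroLoop (PySem.Int.floordiv n 10) (result + digit * place) (place * 10)
  else result
termination_by n.toNat
decreasing_by
  have h0 : (0 : Int) < 10 := by norm_num
  have hlt : PySem.Int.floordiv n 10 < n := by
    rw [PySem.Int.floordiv_lt_iff_lt_mul h0]; omega
  have hge : (0 : Int) ≤ PySem.Int.floordiv n 10 := by
    rw [PySem.Int.le_floordiv_iff_mul_le h0]; omega
  have := hge; omega

def replaceZero (n : Int) : Int :=
  if n = 0 then 1
  else replaceZeroLoop n 0 1

-- ===== PORT B =====
-- one scan over str(n); int(ch) is PySem.Int.ofChars? [ch] (its ValueError = none is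
-- unreachable under Pre_, where every ch is a decimal digit; .getD 0 only totalises)
def replaceZero_alt (n : Int) : Int :=
  (PySem.Int.toChars n).foldl
    (fun result ch => 10 * result + (if ch == '0' then 1 else (PySem.Int.ofChars? [ch]).getD 0)) 0

-- ===== PRECONDITION & SPEC =====
-- Pre_ excludes n < 0: there A's loop never runs and it returns its initial accumulator 0
-- (an artefact), while B's per-character int() raises ValueError on the '-' sign character.
def Pre_replaceZero (n : Int) : Prop := 0 ≤ n
instance (n : Int) : Decidable (Pre_replaceZero n) := by unfold Pre_replaceZero; infer_instance
def pvWitness_replaceZero : Int := (105)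

def Spec_replaceZero (n : Int) (out : Int) : Prop := out = replaceZero_alt n
instance (n : Int) (out : Int) : Decidable (Spec_replaceZero n out) := by unfold Spec_replaceZero; infer_instance

-- ===== CLAIM (what is proved, stated in full; the proofs are below) =====
def Claim_equal_replaceZero : Prop := ∀ (n : Int), Dom_replaceZero n → Pre_replaceZero n → Spec_replaceZero n (replaceZero n)

-- ===== LEMMAS AND PROOFS =====

-- the step function of B's fold, named for the proofs
def altStep (result : Int) (ch : Char) : Int :=
  10 * result + (if ch == '0' then 1 else (PySem.Int.ofChars? [ch]).getD 0)

theorem replaceZero_alt_eq (n : Int) :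
    replaceZero_alt n = (PySem.Int.toChars n).foldl altStep 0 := rfl

-- the common value both programs compute for a nonnegative digit source m
def S (m : Nat) : Int :=
  if m = 0 then 0
  else S (m / 10) * 10 + (if m % 10 = 0 then 1 else (m % 10 : Int))
decreasing_by exact Nat.div_lt_self (by omega) (by norm_num)

-- the digit characters of m, most significant first (what Nat.toDigitsCore produces)
def DChars (m : Nat) : List Char :=
  if m < 10 then [Nat.digitChar (m % 10)]
  else DChars (m / 10) ++ [Nat.digitChar (m % 10)]
decreasing_by exact Nat.div_lt_self (by omega) (by norm_num)

theorem toDigitsCore_eq_DChars : ∀ (fuel m : Nat) (acc : List Char), m < fuel →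
    Nat.toDigitsCore 10 fuel m acc = DChars m ++ acc := by
  intro fuel
  induction fuel with
  | zero => intro m acc h; omega
  | succ f ih =>
    intro m acc h
    rw [Nat.toDigitsCore, DChars]
    by_cases h10 : m < 10
    · have : m / 10 = 0 := Nat.div_eq_of_lt h10
      simp [this, h10]
    · have hne : ¬ m / 10 = 0 := by omega
      have hlt : m / 10 < f := by
        have := Nat.div_lt_self (show 0 < m by omega) (show 1 < 10 by norm_num)
        omega
      simp only [hne, h10, ite_false]
      rw [ih (m / 10) (Nat.digitChar (m % 10) :: acc) hlt]
      simp

theorem ofChars_digitChar : ∀ d : Nat, d < 10 →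
    (PySem.Int.ofChars? [Nat.digitChar d]).getD 0 = (d : Int) := by decide

theorem digitChar_eq_zero_iff : ∀ d : Nat, d < 10 →
    ((Nat.digitChar d == '0') = (d == 0)) := by decide

theorem altStep_digitChar (r : Int) (d : Nat) (hd : d < 10) :
    altStep r (Nat.digitChar d) = 10 * r + (if d = 0 then 1 else (d : Int)) := by
  unfold altStep
  rw [digitChar_eq_zero_iff d hd, ofChars_digitChar d hd]
  by_cases h : d = 0 <;> simp [h]

theorem foldl_DChars (m : Nat) (hm : 0 < m) : (DChars m).foldl altStep 0 = S m := by
  induction m using Nat.strong_induction_on with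
  | _ m ih =>
    rw [DChars, S]
    have hmod : m % 10 < 10 := Nat.mod_lt _ (by norm_num)
    by_cases h10 : m < 10
    · have hq : m / 10 = 0 := Nat.div_eq_of_lt h10
      simp only [h10, ite_true, List.foldl_cons, List.foldl_nil]
      rw [altStep_digitChar 0 (m % 10) hmod]
      rw [S, if_neg (show ¬ m = 0 by omega), hq, S]
      simp
    · have hq : 0 < m / 10 := Nat.div_pos (by omega) (by norm_num)
      have hlt : m / 10 < m := Nat.div_lt_self hm (by norm_num)
      simp only [h10, ite_false, List.foldl_append, List.foldl_cons, List.foldl_nil]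
      rw [ih (m / 10) hlt hq, altStep_digitChar (S (m / 10)) (m % 10) hmod,
        if_neg (show ¬ m = 0 by omega)]
      push_cast
      split_ifs <;> ring

theorem loop_eq_S : ∀ (m : Nat) (res place : Int), 0 < m →
    replaceZeroLoop (m : Int) res place = res + place * S m := by
  intro m
  induction m using Nat.strong_induction_on with
  | _ m ih =>
    intro res place hm
    rw [replaceZeroLoop]
    have hpos : ((m : Int) > 0) := by exact_mod_cast hm
    have hmod : PySem.Int.mod (m : Int) 10 = ((m % 10 : Nat) : Int) := by
      simp [pysem]
    have hdiv : PySem.Int.floordiv (m : Int) 10 = ((m / 10 : Nat) : Int) := by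
      simp [pysem]
    have hcast : (((m % 10 : Nat) : Int) = 0) ↔ (m % 10 = 0) := by omega
    simp only [hpos, dite_true, hmod, hdiv, hcast]
    by_cases hq : m / 10 = 0
    · rw [hq]
      have hstop : ∀ r p : Int, replaceZeroLoop ((0 : Nat) : Int) r p = r := by
        intro r p; rw [replaceZeroLoop]; norm_num
      rw [hstop]
      conv_rhs => rw [S, if_neg (show ¬ m = 0 by omega)]
      rw [hq, S, if_pos rfl]
      push_cast
      split_ifs <;> ring
    · have hlt : m / 10 < m := Nat.div_lt_self hm (by norm_num)
      rw [ih (m / 10) hlt _ _ (by omega)]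
      conv_rhs => rw [S, if_neg (show ¬ m = 0 by omega)]
      push_cast
      split_ifs <;> ring

theorem alt_eq_S (m : Nat) (hm : 0 < m) : replaceZero_alt (m : Int) = S m := by
  rw [replaceZero_alt_eq]
  have htc : PySem.Int.toChars (m : Int) = Nat.toDigits 10 m := by
    simp [PySem.Int.toChars, show ¬ ((m : Int) < 0) by omega]
  rw [htc, Nat.toDigits, toDigitsCore_eq_DChars (m + 1) m [] (by omega), List.append_nil]
  exact foldl_DChars m hm

-- ===== VERDICT (by name: the statement is the Claim_ definition above) =====
theorem replaceZero_spec : Claim_equal_replaceZero := by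
  intro n _ hpre
  unfold Spec_replaceZero
  by_cases h0 : n = 0
  · subst h0; decide
  · have hm : 0 < n.toNat := by unfold Pre_replaceZero at hpre; omega
    have hn : n = ((n.toNat : Nat) : Int) := by omega
    rw [hn, alt_eq_S n.toNat hm]
    unfold replaceZero
    rw [if_neg (by omega), loop_eq_S n.toNat 0 1 hm]
    ring
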